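-- pv_equiv track=rewrite | github.com/grapergrape/cypher-competition | preprocessing.py | process_target_source
-- ===== SOURCE A (Python) =====
-- def process_target_source(cypher: str, triples: list) -> str:
--     """
--     This function processes the target and source nodes in the cypher query to be more similar to the schema
--
--
--     Input: cypher query, schema
--     Output: cypher query with target and source nodes processed
--     """
--
--     for triple in triples:
--         source_node, relation, target_node = [t.strip(' `') for t in triple]
--
--         # Lists to hold our cypher fragments
--         cypher_fragments = []
--         last_index = 0
--
--         # Find the next ( or ) starting at the given index
--         for index in range(len(cypher)):
--             if cypher[index] in ['(', ')']:
--                 # Append the cypher fragment to our list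
--                 cypher_fragments.append(cypher[last_index:index+1])
--                 last_index = index + 1
--
--         # Process the cypher fragments
--         for index, fragment in enumerate(cypher_fragments):
--             # If fragment starts with source_node or target_node, replace it
--             if fragment.lstrip('(`').startswith(source_node):
--                 cypher_fragments[index] = f'({source_node})'
--             elif fragment.lstrip('(`').startswith(target_node):
--                 cypher_fragments[index] = f'({target_node})'
--
--         # Join the processed fragments back into the cypher string
--         cypher = ''.join(cypher_fragments)
--
--     return cypher
-- ===== SOURCE B (Python) =====
-- def _cut(s):
--     """Split s into (prefix up to and including the first parenthesis, remainder),
--     or None if s contains no parenthesis."""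
--     for i, c in enumerate(s):
--         if c in '()':
--             return s[:i + 1], s[i + 1:]
--     return None
--
--
-- def process_target_source(cypher: str, triples: list) -> str:
--     for triple in triples:
--         source_node, relation, target_node = [t.strip(' `') for t in triple]
--         out = []
--         rest = cypher
--         while True:
--             cut = _cut(rest)
--             if cut is None:
--                 break
--             seg, rest = cut
--             head = seg.lstrip('(`')
--             if head.startswith(source_node):
--                 out.append('(' + source_node + ')')
--             elif head.startswith(target_node):
--                 out.append('(' + target_node + ')')
--             else:
--                 out.append(seg)
--         cypher = ''.join(out)
--     return cypher
-- ===== Notes on version B (the rewrite author's own statement) =====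
-- stated objective: alternative
-- what changed: Replaces A's three-phase pipeline per triple (index loop collecting fragments into a list, a second enumerate loop mutating that list in place, then join) with a single cut-and-consume pass: repeatedly cut the string at the first parenthesis and emit the (possibly replaced) segment immediately, so no fragment list is built and rewritten.
import Mathlib
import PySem

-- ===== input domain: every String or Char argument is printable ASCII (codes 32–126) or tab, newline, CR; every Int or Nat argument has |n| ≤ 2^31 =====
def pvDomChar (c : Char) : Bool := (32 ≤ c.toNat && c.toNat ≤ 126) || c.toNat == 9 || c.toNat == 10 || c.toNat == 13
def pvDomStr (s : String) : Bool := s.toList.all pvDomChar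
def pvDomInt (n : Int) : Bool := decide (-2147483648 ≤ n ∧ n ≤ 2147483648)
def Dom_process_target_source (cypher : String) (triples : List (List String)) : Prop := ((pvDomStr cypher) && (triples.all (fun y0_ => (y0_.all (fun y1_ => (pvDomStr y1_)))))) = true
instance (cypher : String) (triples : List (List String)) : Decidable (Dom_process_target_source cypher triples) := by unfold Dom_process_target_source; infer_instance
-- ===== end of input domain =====

-- B replaces A's per-triple three-phase pipeline (collect fragments, rewrite the
-- fragment list in place, join) by a single cut-at-next-parenthesis consuming pass
-- (objective: alternative decomposition; same cost).

-- shared helpers: the character tests both Pythons perform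
def pvIsParen (c : Char) : Bool := c == '(' || c == ')'
-- exact port of .lstrip('(`') (a hand-written drop of leading '(' and '`' characters)
def pvLstripParen (cs : List Char) : List Char := cs.dropWhile (fun c => c == '(' || c == '`')
-- t.strip(' `')
def pvStripTS (t : String) : List Char := PySem.Chars.stripChars t.toList [' ', '`']

-- ===== PORT A =====
-- A's first inner loop: for index in range(len(cypher)): collect cypher[last_index:index+1] at each paren
def pvFragsA (cy : List Char) : List (List Char) :=
  ((PySem.List.enumerate cy 0).foldl
    (fun (st : List (List Char) × Int) p =>
      if pvIsParen p.2 then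
        (st.1 ++ [PySem.List.slice cy (some st.2) (some (p.1 + 1))], p.1 + 1)
      else st)
    ([], 0)).1

-- A's second inner loop body: replace a fragment in place
def pvReplA (src tgt frag : List Char) : List Char :=
  if PySem.Chars.startswith (pvLstripParen frag) src then ('(' :: src) ++ [')']
  else if PySem.Chars.startswith (pvLstripParen frag) tgt then ('(' :: tgt) ++ [')']
  else frag

def pvStepA (cy : List Char) (triple : List String) : List Char :=
  match triple.map pvStripTS with
  | [src, _rel, tgt] => PySem.Chars.join [] ((pvFragsA cy).map (pvReplA src tgt))
  | _ => cy  -- Python raises ValueError here (unpacking); excluded by Pre_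

def process_target_source (cypher : String) (triples : List (List String)) : String :=
  String.mk (triples.foldl pvStepA cypher.toList)

-- ===== PORT B =====
-- B's _cut helper: scan with enumerate, return (s[:i+1], s[i+1:]) at the first paren
def pvCutAux (s : List Char) : List Char → Nat → Option (List Char × List Char)
  | [], _ => none
  | c :: r, i =>
      if pvIsParen c then
        some (PySem.List.slice s (some 0) (some ((i : Int) + 1)),
              PySem.List.slice s (some ((i : Int) + 1)) none)
      else pvCutAux s r (i + 1)

def pvCut (s : List Char) : Option (List Char × List Char) := pvCutAux s s 0

-- termination fact for B's while loop (cited by pvLoopB's decreasing_by)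
theorem pvCutAux_rest_lt (s : List Char) :
    ∀ (l : List Char) (i : Nat) seg rest, l = s.drop i → pvCutAux s l i = some (seg, rest) →
      rest.length < s.length := by
  intro l
  induction l with
  | nil => intro i seg rest _ h; simp [pvCutAux] at h
  | cons c r ih =>
    intro i seg rest hdrop h
    have hi : i < s.length := by
      by_contra hge
      have : s.drop i = [] := List.drop_eq_nil_of_le (by omega)
      rw [this] at hdrop; simp at hdrop
    unfold pvCutAux at h
    by_cases hp : pvIsParen c = true
    · simp only [hp, if_true, Option.some.injEq, Prod.mk.injEq] at h
      have : rest = s.drop (i + 1) := by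
        rw [← h.2]
        have : ((i : Int) + 1) = ((i + 1 : Nat) : Int) := by push_cast; ring
        rw [this, PySem.List.slice_from_natCast]
      rw [this]; simp; omega
    · simp only [hp, if_false] at h
      exact ih (i + 1) seg rest (by rw [← List.drop_drop, ← hdrop]; simp) h

theorem pvCut_rest_lt {s seg rest : List Char} (h : pvCut s = some (seg, rest)) :
    rest.length < s.length :=
  pvCutAux_rest_lt s s 0 seg rest (by simp) h

-- B's while loop: cut at the next parenthesis, emit the replaced segment, recurse on the rest
def pvLoopB (src tgt : List Char) (rest : List Char) : List Char :=
  match h : pvCut rest with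
  | none => []
  | some (seg, rest') =>
      (if PySem.Chars.startswith (pvLstripParen seg) src then ('(' :: src) ++ [')']
       else if PySem.Chars.startswith (pvLstripParen seg) tgt then ('(' :: tgt) ++ [')']
       else seg) ++ pvLoopB src tgt rest'
termination_by rest.length
decreasing_by exact pvCut_rest_lt h

def pvStepB (cy : List Char) (triple : List String) : List Char :=
  match triple.map pvStripTS with
  | [src, _rel, tgt] => pvLoopB src tgt cy
  | _ => cy  -- Python raises ValueError here (unpacking); excluded by Pre_

def process_target_source_alt (cypher : String) (triples : List (List String)) : String :=
  String.mk (triples.foldl pvStepB cypher.toList)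

-- ===== PRECONDITION & SPEC =====
-- Pre_ excludes triples that do not have exactly three components: there Python's
-- unpacking 'source_node, relation, target_node = …' raises ValueError in both A and B.
def Pre_process_target_source (cypher : String) (triples : List (List String)) : Prop :=
  ∀ t ∈ triples, t.length = 3
instance (cypher : String) (triples : List (List String)) : Decidable (Pre_process_target_source cypher triples) := by unfold Pre_process_target_source; infer_instance

def pvWitness_process_target_source : String × List (List String) :=
  ("MATCH (a)-[r]->(b) RETURN a", [[" a ", "r", "`b`"]])

def Spec_process_target_source (cypher : String) (triples : List (List String)) (out : String) : Prop := out = process_target_source_alt cypher triples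
instance (cypher : String) (triples : List (List String)) (out : String) : Decidable (Spec_process_target_source cypher triples out) := by unfold Spec_process_target_source; infer_instance

-- ===== CLAIM (what is proved, stated in full; the proofs are below) =====
def Claim_equal_process_target_source : Prop := ∀ (cypher : String) (triples : List (List String)), Dom_process_target_source cypher triples → Pre_process_target_source cypher triples → Spec_process_target_source cypher triples (process_target_source cypher triples)

-- ===== LEMMAS AND PROOFS =====

-- reference splitter: the fragment list both sides implicitly compute
def pvSplitF (cs : List Char) : List (List Char) :=
  match h : pvCut cs with
  | none => []
  | some (seg, rest) => seg :: pvSplitF rest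
termination_by cs.length
decreasing_by exact pvCut_rest_lt h

-- pvCut on a paren-free list is none
theorem pvCutAux_none (s : List Char) :
    ∀ (l : List Char) (i : Nat), (∀ c ∈ l, pvIsParen c = false) → pvCutAux s l i = none := by
  intro l
  induction l with
  | nil => intro i _; rfl
  | cons c r ih =>
    intro i hl
    have hc := hl c (by simp)
    simp only [pvCutAux, hc, Bool.false_eq_true, if_false]
    exact ih (i + 1) (fun x hx => hl x (by simp [hx]))

-- pvCut finds the first parenthesis
theorem pvCutAux_spec (s : List Char) :
    ∀ (p : List Char) (c : Char) (l : List Char) (i : Nat),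
      (∀ x ∈ p, pvIsParen x = false) → pvIsParen c = true →
      pvCutAux s (p ++ c :: l) i =
        some (PySem.List.slice s (some 0) (some (((i + p.length : Nat) : Int) + 1)),
              PySem.List.slice s (some (((i + p.length : Nat) : Int) + 1)) none) := by
  intro p
  induction p with
  | nil =>
    intro c l i _ hc
    simp only [List.nil_append, pvCutAux, hc, if_true, List.length_nil, Nat.add_zero]
  | cons x p ih =>
    intro c l i hp hc
    have hx := hp x (by simp)
    simp only [List.cons_append, pvCutAux, hx, Bool.false_eq_true, if_false]
    rw [ih c l (i + 1) (fun y hy => hp y (by simp [hy])) hc]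
    have : i + 1 + p.length = i + (x :: p).length := by simp; omega
    rw [this]

theorem pvCut_eq (p : List Char) (c : Char) (l : List Char)
    (hp : ∀ x ∈ p, pvIsParen x = false) (hc : pvIsParen c = true) :
    pvCut (p ++ c :: l) = some (p ++ [c], l) := by
  unfold pvCut
  rw [pvCutAux_spec (p ++ c :: l) p c l 0 hp hc]
  rw [show (((0 + p.length : Nat) : Int) + 1) = ((p.length + 1 : Nat) : Int) by push_cast; ring]
  simp only [PySem.List.slice_zero_start, PySem.List.slice_to_natCast,
    PySem.List.slice_from_natCast]
  simp [List.take_append, List.drop_append]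

theorem pvCut_none (l : List Char) (hl : ∀ c ∈ l, pvIsParen c = false) : pvCut l = none :=
  pvCutAux_none l l 0 hl

theorem pvSplitF_none (l : List Char) (hl : ∀ c ∈ l, pvIsParen c = false) : pvSplitF l = [] := by
  unfold pvSplitF
  rw [pvCut_none l hl]

theorem pvSplitF_cons (p : List Char) (c : Char) (l : List Char)
    (hp : ∀ x ∈ p, pvIsParen x = false) (hc : pvIsParen c = true) :
    pvSplitF (p ++ c :: l) = (p ++ [c]) :: pvSplitF l := by
  conv_lhs => rw [pvSplitF.eq_def]
  rw [pvCut_eq p c l hp hc]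

-- A's fragment-collecting loop computes pvSplitF
theorem pvFragsA_aux (cy : List Char) :
    ∀ (l pending : List Char) (last : Nat) (acc : List (List Char)),
      cy.drop last = pending ++ l → (∀ c ∈ pending, pvIsParen c = false) →
      (((PySem.List.enumerate l ((last : Int) + (pending.length : Int))).foldl
        (fun (st : List (List Char) × Int) p =>
          if pvIsParen p.2 then
            (st.1 ++ [PySem.List.slice cy (some st.2) (some (p.1 + 1))], p.1 + 1)
          else st)
        (acc, (last : Int))).1) = acc ++ pvSplitF (pending ++ l) := by
  intro l
  induction l with
  | nil =>
    intro pending last acc _ hpend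
    simp [PySem.List.enumerate, pvSplitF_none pending hpend]
  | cons c r ih =>
    intro pending last acc hdrop hpend
    simp only [PySem.List.enumerate_cons, List.foldl_cons]
    by_cases hc : pvIsParen c = true
    · simp only [hc, if_true]
      have hslice : PySem.List.slice cy (some (last : Int))
          (some ((last : Int) + (pending.length : Int) + 1)) = pending ++ [c] := by
        rw [show ((last : Int) + (pending.length : Int) + 1)
              = ((last : Int) + ((pending.length + 1 : Nat) : Int)) by push_cast; ring]
        rw [PySem.List.slice_natCast_add, hdrop]
        simp [List.take_append]
      have hdrop' : cy.drop (last + pending.length + 1) = [] ++ r := by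
        have hd : cy.drop (last + pending.length + 1) = (cy.drop last).drop (pending.length + 1) := by
          rw [List.drop_drop]
          congr 1
          all_goals omega
        rw [hd, hdrop]
        simp [List.drop_append]
      rw [hslice]
      have h2 := ih [] (last + pending.length + 1) (acc ++ [pending ++ [c]]) hdrop' (by simp)
      simp only [List.length_nil, Nat.cast_zero, add_zero, List.nil_append] at h2
      rw [show ((last : Int) + (pending.length : Int) + 1)
            = (((last + pending.length + 1 : Nat)) : Int) by push_cast; ring]
      rw [h2, pvSplitF_cons pending c r hpend hc]
      simp
    · rw [if_neg hc]
      have hc' : pvIsParen c = false := by revert hc; cases pvIsParen c <;> simp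
      have h2 := ih (pending ++ [c]) last acc (by rw [hdrop]; simp)
        (by
          intro x hx
          rcases List.mem_append.1 hx with h | h
          · exact hpend x h
          · simp at h; subst h; exact hc')
      rw [show ((last : Int) + (pending.length : Int) + 1)
            = ((last : Int) + (((pending ++ [c]).length : Nat) : Int)) by
              simp only [List.length_append, List.length_cons, List.length_nil]
              push_cast; ring]
      rw [h2]
      simp

theorem pvFragsA_eq (cy : List Char) : pvFragsA cy = pvSplitF cy := by
  have h := pvFragsA_aux cy cy [] 0 [] (by simp) (by simp)
  simpa [pvFragsA] using h

-- ''.join is flatten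
theorem pvJoinNil (l : List (List Char)) : PySem.Chars.join [] l = l.flatten := by
  induction l with
  | nil => rfl
  | cons x l ih =>
    cases l with
    | nil => rw [PySem.Chars.join_singleton]; simp
    | cons y l => rw [PySem.Chars.join_cons_cons]; simp_all

-- B's fused loop equals map-then-flatten over the reference splitter
theorem pvLoopB_eq (src tgt : List Char) (cs : List Char) :
    pvLoopB src tgt cs = ((pvSplitF cs).map (pvReplA src tgt)).flatten := by
  unfold pvLoopB pvSplitF
  cases h : pvCut cs with
  | none => simp
  | some pr =>
    obtain ⟨seg, rest⟩ := pr
    simp only [List.map_cons, List.flatten_cons]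
    rw [pvLoopB_eq src tgt rest]
    rfl
termination_by cs.length
decreasing_by exact pvCut_rest_lt h

theorem pvStep_eq (cy : List Char) (triple : List String) :
    pvStepA cy triple = pvStepB cy triple := by
  unfold pvStepA pvStepB
  cases h : triple.map pvStripTS with
  | nil => rfl
  | cons s1 l =>
    cases l with
    | nil => rfl
    | cons s2 l2 =>
      cases l2 with
      | nil => rfl
      | cons s3 l3 =>
        cases l3 with
        | nil =>
          show PySem.Chars.join [] ((pvFragsA cy).map (pvReplA s1 s3)) = pvLoopB s1 s3 cy
          rw [pvJoinNil, pvFragsA_eq, pvLoopB_eq]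
        | cons s4 l4 => rfl

-- ===== VERDICT (by name: the statement is the Claim_ definition above) =====
theorem process_target_source_spec : Claim_equal_process_target_source := by
  intro cypher triples hdom hpre
  show _ = _
  clear hdom hpre
  unfold process_target_source process_target_source_alt
  congr 1
  generalize cypher.toList = cy
  induction triples generalizing cy with
  | nil => rfl
  | cons t ts ih =>
    simp only [List.foldl_cons, pvStep_eq]
    exact ih _
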